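-- pv_equiv track=rewrite | github.com/vanbako/amber | tools/ad48_asm.py | format_memh
-- ===== SOURCE A (Python) =====
-- from typing import Callable, Dict, Iterable, List, Optional, Sequence, Tuple
--
-- def format_memh(image: Dict[int, int]) -> str:
--     if not image:
--         return ""
--     lines: List[str] = []
--     pointer: Optional[int] = None
--     for addr in sorted(image):
--         if pointer is None or addr != pointer:
--             lines.append(f"@{addr:X}")
--             pointer = addr
--         lines.append(f"{image[addr]:012X}")
--         pointer = addr + 1
--     return "\n".join(lines) + "\n"
-- ===== SOURCE B (Python) =====
-- def format_memh(image):
--     # Pass 1: group the sorted addresses into contiguous runs (start, [values]).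
--     runs = []
--     for a in sorted(image):
--         if runs and a == runs[-1][0] + len(runs[-1][1]):
--             runs[-1][1].append(image[a])
--         else:
--             runs.append((a, [image[a]]))
--     # Pass 2: render each run as a header line plus its value lines.
--     out = []
--     for start, vals in runs:
--         out.append(f"@{start:X}")
--         out.extend(f"{v:012X}" for v in vals)
--     return "".join(line + "\n" for line in out)
-- ===== Notes on version B (the rewrite author's own statement) =====
-- stated objective: alternative
-- what changed: B first materialises contiguous runs (start, [values]) from the sorted addresses and then renders each run in a second pass, joining 'line+\n' pieces, instead of A's single pointer-tracking loop with a final '\n'.join plus trailing newline and an empty-dict special case.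
import Mathlib
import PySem

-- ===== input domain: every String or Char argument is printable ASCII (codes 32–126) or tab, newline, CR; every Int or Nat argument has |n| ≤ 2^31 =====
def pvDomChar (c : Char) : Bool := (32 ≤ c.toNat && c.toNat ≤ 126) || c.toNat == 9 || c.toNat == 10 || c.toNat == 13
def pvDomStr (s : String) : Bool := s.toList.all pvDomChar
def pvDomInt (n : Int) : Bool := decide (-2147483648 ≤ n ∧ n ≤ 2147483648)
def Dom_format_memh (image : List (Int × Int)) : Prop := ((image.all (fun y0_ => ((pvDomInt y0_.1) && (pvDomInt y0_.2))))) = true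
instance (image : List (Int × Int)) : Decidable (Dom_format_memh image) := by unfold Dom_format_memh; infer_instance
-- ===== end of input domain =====

-- B groups the sorted addresses into contiguous runs first and renders them in a second
-- pass, instead of A's single pointer-tracking loop; same output, same cost (alternative).

-- ===== PORT A =====
-- Shared f-string helpers (both Pythons format with f"{n:X}" / f"{n:012X}"):
def pvHexDigit (n : Nat) : Char := if n < 10 then Char.ofNat (48 + n) else Char.ofNat (55 + n)

-- uppercase hex digits of a Nat, most significant first
def pvHexNat (n : Nat) : List Char :=
  if _h : n < 16 then [pvHexDigit n]
  else pvHexNat (n / 16) ++ [pvHexDigit (n % 16)]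
decreasing_by exact Nat.div_lt_self (by omega) (by omega)

-- f"{n:X}"  (Python prints a '-' sign then the hex of |n|)
def pvHexStr (n : Int) : String :=
  if n < 0 then String.ofList ('-' :: pvHexNat n.natAbs) else String.ofList (pvHexNat n.natAbs)

-- f"{n:012X}"  (zero-padded to 12 characters, the sign counts toward the width)
def pvHex12 (n : Int) : String :=
  let sign : List Char := if n < 0 then ['-'] else []
  let ds := pvHexNat n.natAbs
  String.ofList (sign ++ List.replicate (12 - (ds.length + sign.length)) '0' ++ ds)

-- literal port of A's pointer loop; image[addr] is ported as getD _ 0 — total, since addr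
-- is drawn from the dict's own keys (the KeyError branch is unreachable)
def format_memh (image : List (Int × Int)) : String :=
  let d := PySem.Dict.ofList image
  if d.size = 0 then ""
  else
    let st := (PySem.List.sorted d.keys (fun x => x) false).foldl
      (fun (st : List String × Option Int) addr =>
        let lines := if st.2 = none ∨ ¬ st.2 = some addr then st.1 ++ ["@" ++ pvHexStr addr]
                     else st.1
        (lines ++ [pvHex12 (PySem.Dict.getD d addr 0)], some (addr + 1)))
      ([], none)
    PySem.Str.join "\n" st.1 ++ "\n"

-- ===== PORT B =====
-- literal port of Source B: pass 1 groups sorted addresses into runs (start, values),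
-- appending to the last run while contiguous; pass 2 renders header + value lines
def format_memh_alt (image : List (Int × Int)) : String :=
  let d := PySem.Dict.ofList image
  let runs := (PySem.List.sorted d.keys (fun x => x) false).foldl
    (fun (runs : List (Int × List Int)) a =>
      match runs.getLast? with
      | some r =>
          if a = r.1 + (r.2.length : Int) then runs.dropLast ++ [(r.1, r.2 ++ [PySem.Dict.getD d a 0])]
          else runs ++ [(a, [PySem.Dict.getD d a 0])]
      | none => [(a, [PySem.Dict.getD d a 0])])
    []
  let out := runs.flatMap (fun r => ("@" ++ pvHexStr r.1) :: r.2.map pvHex12)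
  PySem.Str.join "" (out.map (fun line => line ++ "\n"))

-- ===== PRECONDITION & SPEC =====
def Spec_format_memh (image : List (Int × Int)) (out : String) : Prop := out = format_memh_alt image
instance (image : List (Int × Int)) (out : String) : Decidable (Spec_format_memh image out) := by unfold Spec_format_memh; infer_instance

-- ===== CLAIM (what is proved, stated in full; the proofs are below) =====
def Claim_equal_format_memh : Prop := ∀ (image : List (Int × Int)), Dom_format_memh image → Spec_format_memh image (format_memh image)

-- ===== LEMMAS AND PROOFS =====

-- B's pass 2 as a function of the run list
def pvRender (runs : List (Int × List Int)) : List String :=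
  runs.flatMap (fun r => ("@" ++ pvHexStr r.1) :: r.2.map pvHex12)

-- A's loop body, with the dict lookup abstracted to v
def pvStepA (v : Int → Int) (st : List String × Option Int) (addr : Int) : List String × Option Int :=
  ((if st.2 = none ∨ ¬ st.2 = some addr then st.1 ++ ["@" ++ pvHexStr addr] else st.1)
     ++ [pvHex12 (v addr)], some (addr + 1))

-- B's loop body, with the dict lookup abstracted to v
def pvStepB (v : Int → Int) (runs : List (Int × List Int)) (a : Int) : List (Int × List Int) :=
  match runs.getLast? with
  | some r =>
      if a = r.1 + (r.2.length : Int) then runs.dropLast ++ [(r.1, r.2 ++ [v a])]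
      else runs ++ [(a, [v a])]
  | none => [(a, [v a])]

-- invariant: once both loops are past their first address, B's run list renders to A's
-- line list and the "expected next address" of B's last run is A's pointer
lemma pv_loop (v : Int → Int) (addrs : List Int) (pref : List (Int × List Int)) (s : Int) (vals : List Int) :
    pvRender (addrs.foldl (pvStepB v) (pref ++ [(s, vals)]))
      = (addrs.foldl (pvStepA v) (pvRender (pref ++ [(s, vals)]), some (s + (vals.length : Int)))).1 := by
  induction addrs generalizing pref s vals with
  | nil => rfl
  | cons a rest ih =>
    simp only [List.foldl_cons]
    by_cases h : a = s + (vals.length : Int)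
    · have hB : pvStepB v (pref ++ [(s, vals)]) a = pref ++ [(s, vals ++ [v a])] := by
        simp [pvStepB, h]
      have hA : pvStepA v (pvRender (pref ++ [(s, vals)]), some (s + (vals.length : Int))) a
          = (pvRender (pref ++ [(s, vals)]) ++ [pvHex12 (v a)], some (a + 1)) := by
        simp [pvStepA, h]
      rw [hB, hA]
      have := ih pref s (vals ++ [v a])
      simpa [pvRender, h, List.append_assoc, add_assoc] using this
    · have hB : pvStepB v (pref ++ [(s, vals)]) a = (pref ++ [(s, vals)]) ++ [(a, [v a])] := by
        simp [pvStepB, h]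
      have hA : pvStepA v (pvRender (pref ++ [(s, vals)]), some (s + (vals.length : Int))) a
          = (pvRender (pref ++ [(s, vals)]) ++ ["@" ++ pvHexStr a] ++ [pvHex12 (v a)], some (a + 1)) := by
        have : ¬ (some (s + (vals.length : Int)) = some a) := by
          intro hc; exact h (Option.some.inj hc).symm
        simp [pvStepA, this, List.append_assoc]
      rw [hB, hA]
      have := ih (pref ++ [(s, vals)]) a [v a]
      simpa [pvRender, List.append_assoc] using this

-- A's loop only appends, so its line list never becomes empty
lemma pv_foldA_ne_nil (v : Int → Int) (addrs : List Int) :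
    ∀ (L : List String) (p : Option Int), L ≠ [] → (addrs.foldl (pvStepA v) (L, p)).1 ≠ [] := by
  induction addrs with
  | nil => intro L p h; simpa using h
  | cons a rest ih =>
    intro L p h
    simp only [List.foldl_cons]
    exact ih _ _ (by simp)

lemma pv_intercalate_nil : ∀ (ys : List (List Char)), List.intercalate ([] : List Char) ys = ys.flatten
  | [] => rfl
  | [x] => by simp [List.intercalate, List.intersperse]
  | x :: y :: t => by
      have h := pv_intercalate_nil (y :: t)
      simp only [List.intercalate, List.intersperse] at h ⊢
      simp [h]

lemma pv_ichar : ∀ (xs : List (List Char)) (x : List Char),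
    List.intercalate ['\n'] (x :: xs) ++ ['\n'] = ((x :: xs).map (fun l => l ++ ['\n'])).flatten
  | [], x => by simp [List.intercalate, List.intersperse]
  | y :: t, x => by
      have h := pv_ichar t y
      simp only [List.intercalate, List.intersperse] at h ⊢
      simp only [List.map_cons, List.flatten_cons] at h ⊢
      simp [← h]

-- '\n'.join(lines) + '\n'  =  ''.join(line + '\n' for line in lines), for nonempty lines
lemma pv_join_lines (L : List String) (hL : L ≠ []) :
    PySem.Str.join "\n" L ++ "\n" = PySem.Str.join "" (L.map (fun line => line ++ "\n")) := by
  obtain ⟨x, xs, rfl⟩ := List.exists_cons_of_ne_nil hL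
  rw [← String.toList_inj]
  have hnl : ("\n" : String).toList = ['\n'] := rfl
  have hnil : ("" : String).toList = [] := rfl
  simp only [PySem.Str.join, PySem.Chars.join, String.toList_append, String.toList_ofList,
    hnl, hnil, List.map_cons, List.map_map]
  rw [pv_intercalate_nil, pv_ichar]
  simp [Function.comp_def, String.toList_append, hnl]

-- ===== VERDICT (by name: the statement is the Claim_ definition above) =====
theorem format_memh_spec : Claim_equal_format_memh := by
  intro image _
  unfold Spec_format_memh format_memh format_memh_alt
  set d := PySem.Dict.ofList image with hd
  show (if d.size = 0 then ""
        else PySem.Str.join "\n"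
          ((PySem.List.sorted d.keys (fun x => x) false).foldl
            (pvStepA (fun x => PySem.Dict.getD d x 0)) ([], none)).1 ++ "\n")
    = PySem.Str.join ""
        ((pvRender ((PySem.List.sorted d.keys (fun x => x) false).foldl
            (pvStepB (fun x => PySem.Dict.getD d x 0)) [])).map (fun line => line ++ "\n"))
  by_cases hsz : d.size = 0
  · have hitems : d.items = [] := List.length_eq_zero_iff.mp hsz
    have hkeys : d.keys = [] := by simp [PySem.Dict.keys, hitems]
    rw [if_pos hsz, hkeys]
    rfl
  · have hkeys : d.keys ≠ [] := by
      intro hc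
      have hi : d.items = [] := by simpa [PySem.Dict.keys] using congrArg List.length hc
      exact hsz (List.length_eq_zero_iff.mpr hi)
    have hperm := PySem.List.sorted_perm (xs := d.keys) (key := fun x : Int => x) (rev := false)
    have hsor : PySem.List.sorted d.keys (fun x => x) false ≠ [] := by
      intro hcns
      rw [hcns] at hperm
      exact hkeys hperm.symm.eq_nil
    obtain ⟨a, rest, hcons⟩ := List.exists_cons_of_ne_nil hsor
    rw [if_neg hsz, hcons]
    simp only [List.foldl_cons]
    have hfirstA : pvStepA (fun x => PySem.Dict.getD d x 0) ([], none) a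
        = (["@" ++ pvHexStr a, pvHex12 (PySem.Dict.getD d a 0)], some (a + 1)) := by
      simp [pvStepA]
    have hfirstB : pvStepB (fun x => PySem.Dict.getD d x 0) [] a = [(a, [PySem.Dict.getD d a 0])] := by
      simp [pvStepB]
    rw [hfirstA, hfirstB]
    have hloop : pvRender (List.foldl (pvStepB (fun x => PySem.Dict.getD d x 0)) [(a, [PySem.Dict.getD d a 0])] rest)
        = (List.foldl (pvStepA (fun x => PySem.Dict.getD d x 0))
            (["@" ++ pvHexStr a, pvHex12 (PySem.Dict.getD d a 0)], some (a + 1)) rest).1 := by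
      simpa [pvRender] using pv_loop (fun x => PySem.Dict.getD d x 0) rest [] a [PySem.Dict.getD d a 0]
    rw [hloop]
    exact pv_join_lines _ (pv_foldA_ne_nil _ rest _ _ (by simp))
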